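-- pv_equiv track=rewrite | github.com/SkagitIan/OpenSkagit | openskagit/valuation_areas.py | resolve_market_group
-- ===== SOURCE A (Python) =====
-- from typing import Optional
--
-- _PREFIX_BUCKETS = (
--     ("BURLINGTON", ("20B", "21B")),
--     ("LACONNER_CONWAY", ("20LC", "21LC")),
--     ("ANACORTES", ("20A", "21A")),
--     ("SEDRO_WOOLLEY", ("20SW", "21SW")),
--     ("CONCRETE", ("20CC", "10CC")),
--     ("MOUNT_VERNON", ("20MV", "21MV")),
-- )
--
-- def _normalize(code: Optional[str]) -> Optional[str]:
--     if code is None: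
--         return None
--     text = str(code).strip().upper()
--     return text or None
--
-- def resolve_market_group(neighborhood_code: Optional[str]) -> Optional[str]:
--     """
--     Map assessor neighborhood codes to broader valuation areas used by adjustments.
--     Returns None when the code is missing/blank so legacy fallbacks (e.g., city_district)
--     can still be applied by callers.
--     """
--     normalized = _normalize(neighborhood_code)
--     if not normalized:
--         return None
--     for area, prefixes in _PREFIX_BUCKETS:
--         if normalized.startswith(prefixes):
--             return area
--     return "OTHER"
-- ===== SOURCE B (Python) =====
-- from typing import Optional
--
-- _PREFIX_TO_AREA = {
--     "20B": "BURLINGTON", "21B": "BURLINGTON",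
--     "20LC": "LACONNER_CONWAY", "21LC": "LACONNER_CONWAY",
--     "20A": "ANACORTES", "21A": "ANACORTES",
--     "20SW": "SEDRO_WOOLLEY", "21SW": "SEDRO_WOOLLEY",
--     "20CC": "CONCRETE", "10CC": "CONCRETE",
--     "20MV": "MOUNT_VERNON", "21MV": "MOUNT_VERNON",
-- }
--
-- def resolve_market_group(neighborhood_code: Optional[str]) -> Optional[str]:
--     if neighborhood_code is None:
--         return None
--     normalized = str(neighborhood_code).strip().upper()
--     if not normalized:
--         return None
--     area = _PREFIX_TO_AREA.get(normalized[:4])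
--     if area is None:
--         area = _PREFIX_TO_AREA.get(normalized[:3])
--     return area if area is not None else "OTHER"
-- ===== Notes on version B (the rewrite author's own statement) =====
-- stated objective: idiomatic
-- what changed: Replaces the linear startswith scan over six prefix buckets with two direct dict lookups on the length-4 and length-3 prefix slices of the normalized code (every bucket prefix has length 3 or 4, and no length-4 prefix extends a length-3 one, so the slice lookups decide the same area).
import Mathlib
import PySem

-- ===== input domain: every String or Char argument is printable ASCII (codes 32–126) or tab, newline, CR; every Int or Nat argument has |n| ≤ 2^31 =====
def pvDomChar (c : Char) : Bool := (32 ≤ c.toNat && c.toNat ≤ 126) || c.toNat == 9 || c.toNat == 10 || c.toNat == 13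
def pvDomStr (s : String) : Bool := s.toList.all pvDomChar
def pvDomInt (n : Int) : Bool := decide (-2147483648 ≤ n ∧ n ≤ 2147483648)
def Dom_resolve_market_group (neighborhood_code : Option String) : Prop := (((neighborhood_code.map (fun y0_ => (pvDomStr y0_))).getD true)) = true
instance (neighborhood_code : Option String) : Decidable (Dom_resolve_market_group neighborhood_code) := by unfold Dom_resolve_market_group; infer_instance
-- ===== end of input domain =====

-- B replaces A's linear startswith scan over six prefix buckets by two dict lookups on the
-- length-4 and length-3 prefix slices of the normalized code (idiomatic; same result).

-- ===== PORT A =====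
def pvBuckets : List (String × String × String) :=
  [("BURLINGTON", "20B", "21B"), ("LACONNER_CONWAY", "20LC", "21LC"),
   ("ANACORTES", "20A", "21A"), ("SEDRO_WOOLLEY", "20SW", "21SW"),
   ("CONCRETE", "20CC", "10CC"), ("MOUNT_VERNON", "20MV", "21MV")]

-- _normalize: str(code).strip().upper(), empty string becomes None
def pvNormalize (code : Option String) : Option String :=
  match code with
  | none => none
  | some c =>
    let text := PySem.Str.upper (PySem.Str.strip c)
    if text.toList = [] then none else some text

-- the for-loop over _PREFIX_BUCKETS; startswith on a 2-tuple of prefixes is the disjunction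
def pvScan (t : String) : List (String × String × String) → String
  | [] => "OTHER"
  | (area, p1, p2) :: rest =>
    if PySem.Str.startswith t p1 || PySem.Str.startswith t p2 then area else pvScan t rest

def resolve_market_group (neighborhood_code : Option String) : Option String :=
  match pvNormalize neighborhood_code with
  | none => none
  | some normalized => some (pvScan normalized pvBuckets)

-- ===== PORT B =====
def pvPrefixToArea : PySem.Dict String String := PySem.Dict.mk
  [("20B","BURLINGTON"),("21B","BURLINGTON"),("20LC","LACONNER_CONWAY"),("21LC","LACONNER_CONWAY"),
   ("20A","ANACORTES"),("21A","ANACORTES"),("20SW","SEDRO_WOOLLEY"),("21SW","SEDRO_WOOLLEY"),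
   ("20CC","CONCRETE"),("10CC","CONCRETE"),("20MV","MOUNT_VERNON"),("21MV","MOUNT_VERNON")]

def resolve_market_group_alt (neighborhood_code : Option String) : Option String :=
  match neighborhood_code with
  | none => none
  | some c =>
    let normalized := PySem.Str.upper (PySem.Str.strip c)
    if normalized.toList = [] then none
    else
      let area₀ := pvPrefixToArea.get? (PySem.Str.slice normalized none (some 4))
      let area := match area₀ with
        | some a => some a
        | none => pvPrefixToArea.get? (PySem.Str.slice normalized none (some 3))
      match area with
      | some a => some a
      | none => some "OTHER"

-- ===== PRECONDITION & SPEC =====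
def Spec_resolve_market_group (neighborhood_code : Option String) (out : Option String) : Prop := out = resolve_market_group_alt neighborhood_code
instance (neighborhood_code : Option String) (out : Option String) : Decidable (Spec_resolve_market_group neighborhood_code out) := by unfold Spec_resolve_market_group; infer_instance

-- ===== CLAIM (what is proved, stated in full; the proofs are below) =====
def Claim_equal_resolve_market_group : Prop := ∀ (neighborhood_code : Option String), Dom_resolve_market_group neighborhood_code → Spec_resolve_market_group neighborhood_code (resolve_market_group neighborhood_code)

-- ===== LEMMAS AND PROOFS =====
theorem sw_eq (t : String) (p : String) : PySem.Str.startswith t p = decide (t.toList.take p.toList.length = p.toList) := by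
  simp only [PySem.Str.startswith_eq]
  rw [Bool.eq_iff_iff, PySem.Chars.startswith_iff, decide_eq_true_iff, List.prefix_iff_eq_take]
  constructor <;> intro hh <;> exact hh.symm

theorem beq_ofList (w : String) (l : List Char) : (w == String.ofList l) = decide (l = w.toList) := by
  rw [Bool.eq_iff_iff, beq_iff_eq, decide_eq_true_iff]
  constructor
  · intro h; subst h; simp
  · intro h; refine String.ext ?_; simp [h]

theorem slice_ofList (t : String) (n : Nat) : (PySem.Str.slice t none (some (n : Int))) = String.ofList (t.toList.take n) := by
  refine String.ext ?_
  simp [PySem.List.slice_to_natCast]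

theorem pv_take3_ne {a : Type} (m : List a) (l : List a) (hl : l.length = 4) : List.take 3 m ≠ l := by
  intro h
  have := congrArg List.length h
  simp [hl] at this
  omega

theorem core (t : String) :
    some (pvScan t pvBuckets) =
      (let area₀ := pvPrefixToArea.get? (PySem.Str.slice t none (some 4))
       let area := match area₀ with
         | some a => some a
         | none => pvPrefixToArea.get? (PySem.Str.slice t none (some 3))
       match area with
       | some a => some a
       | none => some "OTHER") := by
  rw [show ((4:Int)) = ((4:Nat):Int) from rfl, show ((3:Int)) = ((3:Nat):Int) from rfl,
      slice_ofList t 4, slice_ofList t 3]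
  simp only [pvScan, pvBuckets, sw_eq, pvPrefixToArea, PySem.Dict.get?_mk_cons, beq_ofList]
  simp only [show ("20B":String).toList = ['2','0','B'] from rfl,
    show ("21B":String).toList = ['2','1','B'] from rfl,
    show ("20LC":String).toList = ['2','0','L','C'] from rfl,
    show ("21LC":String).toList = ['2','1','L','C'] from rfl,
    show ("20A":String).toList = ['2','0','A'] from rfl,
    show ("21A":String).toList = ['2','1','A'] from rfl,
    show ("20SW":String).toList = ['2','0','S','W'] from rfl,
    show ("21SW":String).toList = ['2','1','S','W'] from rfl,
    show ("20CC":String).toList = ['2','0','C','C'] from rfl,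
    show ("10CC":String).toList = ['1','0','C','C'] from rfl,
    show ("21MV":String).toList = ['2','1','M','V'] from rfl,
    show ("20MV":String).toList = ['2','0','M','V'] from rfl,
    List.length_cons, List.length_nil, PySem.Dict.get?]
  norm_num
  rw [show (List.take 3 t.toList) = (List.take 4 t.toList).take 3 from by rw [List.take_take]; norm_num]
  generalize List.take 4 t.toList = m
  by_cases e0 : m = ['2','0','B']
  · subst e0; decide
  by_cases e1 : m = ['2','1','B']
  · subst e1; decide
  by_cases e2 : m = ['2','0','L','C']
  · subst e2; decide
  by_cases e3 : m = ['2','1','L','C']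
  · subst e3; decide
  by_cases e4 : m = ['2','0','A']
  · subst e4; decide
  by_cases e5 : m = ['2','1','A']
  · subst e5; decide
  by_cases e6 : m = ['2','0','S','W']
  · subst e6; decide
  by_cases e7 : m = ['2','1','S','W']
  · subst e7; decide
  by_cases e8 : m = ['2','0','C','C']
  · subst e8; decide
  by_cases e9 : m = ['1','0','C','C']
  · subst e9; decide
  by_cases e10 : m = ['2','0','M','V']
  · subst e10; decide
  by_cases e11 : m = ['2','1','M','V']
  · subst e11; decide
  by_cases f0 : List.take 3 m = ['2','0','B']
  · simp [e0, e1, e2, e3, e4, e5, e6, e7, e8, e9, e10, e11, f0]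
  by_cases f1 : List.take 3 m = ['2','1','B']
  · simp [e0, e1, e2, e3, e4, e5, e6, e7, e8, e9, e10, e11, f1]
  by_cases f2 : List.take 3 m = ['2','0','A']
  · simp [e0, e1, e2, e3, e4, e5, e6, e7, e8, e9, e10, e11, f2]
  by_cases f3 : List.take 3 m = ['2','1','A']
  · simp [e0, e1, e2, e3, e4, e5, e6, e7, e8, e9, e10, e11, f3]
  simp [e0, e1, e2, e3, e4, e5, e6, e7, e8, e9, e10, e11, f0, f1, f2, f3, pv_take3_ne m ['2','0','L','C'] (by decide), pv_take3_ne m ['2','1','L','C'] (by decide), pv_take3_ne m ['2','0','S','W'] (by decide), pv_take3_ne m ['2','1','S','W'] (by decide), pv_take3_ne m ['2','0','C','C'] (by decide), pv_take3_ne m ['1','0','C','C'] (by decide), pv_take3_ne m ['2','0','M','V'] (by decide), pv_take3_ne m ['2','1','M','V'] (by decide)]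

-- ===== VERDICT (by name: the statement is the Claim_ definition above) =====
set_option maxHeartbeats 1000000 in
theorem resolve_market_group_spec : Claim_equal_resolve_market_group := by
  intro code _hdom
  unfold Spec_resolve_market_group
  cases code with
  | none => rfl
  | some c =>
    simp only [resolve_market_group, resolve_market_group_alt, pvNormalize]
    by_cases h : (PySem.Str.upper (PySem.Str.strip c)).toList = []
    · simp [h]
    · simp only [if_neg h]
      exact core (PySem.Str.upper (PySem.Str.strip c))
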